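-- pv_equiv track=rewrite | github.com/RaduLupan/learning-python | python-dsa/assignment-2.py | get_index2
-- ===== SOURCE A (Python) =====
-- def get_index2 (data_list, a_string):
--     '''
--     Description: Simple hashing function that uses the ord() function to convert all characters in a string into numbers multiplied by powers of 2 that reflect the position in the string.
--     By factoring in the character position in the calculation of the index, it ensures that indeces for strings consisting of permutations of the same characters are different.
--     Algorithm:
--     1. Iterate over the string, character-by-character.
--     2. Convert each character to a number by multiplying its ord() number by 2 at the power of its position in the string.
--     3. Add the numbers for each character to obtain the hash for the entire string.
--     Example:
--     'abc' -> ord('a') * 2**0 + ord('b') * 2**1 + ord('c') * 2**2 = 97 + 98 * 2 + 99 * 4 = 689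
--     'cba' -> ord('c') * 2**0 + ord('b') * 2**1 + ord('a') * 2**2 = 99 + 98 * 2 + 97 * 4 = 683
--
--     4. Take the reminder of the result with the size of the data list.
--     '''
--     result = 0
--     n = len(a_string)
--
--     for i in range(n):
--         a_number = ord(a_string[i]) * 2**i
--         result += a_number
--
--     list_index = result % len(data_list)
--
--     return list_index
-- ===== SOURCE B (Python) =====
-- def get_index2(data_list, a_string):
--     # Horner's method: process characters from the end, doubling the accumulator.
--     result = 0
--     for ch in reversed(a_string):
--         result = result * 2 + ord(ch)
--     return result % len(data_list)
-- ===== Notes on version B (the rewrite author's own statement) =====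
-- stated objective: faster
-- what changed: Replaces the forward index loop that computes a fresh 2**i power each iteration by Horner's method: a single backward pass maintaining one doubling accumulator.
import Mathlib
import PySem

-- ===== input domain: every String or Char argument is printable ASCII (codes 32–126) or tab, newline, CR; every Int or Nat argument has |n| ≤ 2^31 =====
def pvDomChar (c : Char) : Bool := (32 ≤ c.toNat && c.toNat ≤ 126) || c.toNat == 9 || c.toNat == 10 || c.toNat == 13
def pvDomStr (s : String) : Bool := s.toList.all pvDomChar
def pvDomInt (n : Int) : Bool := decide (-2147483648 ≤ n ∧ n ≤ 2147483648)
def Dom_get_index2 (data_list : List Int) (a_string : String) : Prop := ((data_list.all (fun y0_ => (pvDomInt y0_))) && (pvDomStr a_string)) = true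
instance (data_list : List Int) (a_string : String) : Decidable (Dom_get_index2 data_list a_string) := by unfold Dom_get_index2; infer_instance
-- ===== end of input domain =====

-- B replaces the forward loop with per-index powers 2**i by a backward Horner pass (one doubling accumulator); alternative decomposition, same result.

-- ===== PORT A =====
-- forward loop over i in range(len(a_string)): result += ord(a_string[i]) * 2**i; then % len(data_list)
def get_index2 (data_list : List Int) (a_string : String) : Int :=
  let cs := a_string.toList
  let n := cs.length
  let result := (List.range n).foldl (fun result i => result + (Int.ofNat (cs.getD i ' ').toNat) * 2 ^ i) 0
  PySem.Int.mod result (Int.ofNat data_list.length)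

-- ===== PORT B =====
-- Horner: for ch in reversed(a_string): result = result * 2 + ord(ch); then % len(data_list)
def get_index2_alt (data_list : List Int) (a_string : String) : Int :=
  let result := a_string.toList.reverse.foldl (fun r c => r * 2 + Int.ofNat c.toNat) 0
  PySem.Int.mod result (Int.ofNat data_list.length)

-- ===== PRECONDITION & SPEC =====
-- Pre_ excludes only the empty list, on which Python A raises ZeroDivisionError ('% 0').
def Pre_get_index2 (data_list : List Int) (a_string : String) : Prop := data_list ≠ []
instance (data_list : List Int) (a_string : String) : Decidable (Pre_get_index2 data_list a_string) := by unfold Pre_get_index2; infer_instance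
def pvWitness_get_index2 : List Int × String := ([3, 5], "ab")

def Spec_get_index2 (data_list : List Int) (a_string : String) (out : Int) : Prop := out = get_index2_alt data_list a_string
instance (data_list : List Int) (a_string : String) (out : Int) : Decidable (Spec_get_index2 data_list a_string out) := by unfold Spec_get_index2; infer_instance

-- ===== CLAIM (what is proved, stated in full; the proofs are below) =====
def Claim_equal_get_index2 : Prop := ∀ (data_list : List Int) (a_string : String), Dom_get_index2 data_list a_string → Pre_get_index2 data_list a_string → Spec_get_index2 data_list a_string (get_index2 data_list a_string)

-- ===== LEMMAS AND PROOFS =====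

-- the common value: Σ_i ord(c_i) * 2^i, as structural recursion
def pvHSum : List Char → Int
  | [] => 0
  | c :: t => Int.ofNat c.toNat + 2 * pvHSum t

theorem pvA_sum (cs : List Char) :
    (List.range cs.length).foldl (fun result i => result + (Int.ofNat (cs.getD i ' ').toNat) * 2 ^ i) 0 = pvHSum cs := by
  have key : ∀ (cs : List Char),
      ((List.range cs.length).map (fun i => (Int.ofNat (cs.getD i ' ').toNat) * 2 ^ i)).sum = pvHSum cs := by
    intro cs
    induction cs with
    | nil => simp [pvHSum]
    | cons c t ih =>
      rw [List.length_cons, List.range_succ_eq_map]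
      simp only [List.map_cons, List.map_map, List.sum_cons, pvHSum]
      have : ((List.range t.length).map
          ((fun i => (Int.ofNat ((c :: t).getD i ' ').toNat) * 2 ^ i) ∘ Nat.succ)).sum
          = 2 * ((List.range t.length).map (fun i => (Int.ofNat (t.getD i ' ').toNat) * 2 ^ i)).sum := by
        rw [← List.sum_map_mul_left]
        congr 1
        apply List.map_congr_left
        intro i _
        simp [Function.comp, pow_succ]
        ring
      rw [this, ih]
      simp
  rw [← key cs, List.sum_eq_foldl, List.foldl_map]

theorem pvB_sum (cs : List Char) (a : Int) :
    cs.reverse.foldl (fun r c => r * 2 + Int.ofNat c.toNat) a = a * 2 ^ cs.length + pvHSum cs := by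
  induction cs generalizing a with
  | nil => simp [pvHSum]
  | cons c t ih =>
    rw [List.reverse_cons, List.foldl_append, ih]
    simp only [List.foldl_cons, List.foldl_nil, pvHSum, List.length_cons, pow_succ]
    ring

-- ===== VERDICT (by name: the statement is the Claim_ definition above) =====
theorem get_index2_spec : Claim_equal_get_index2 := by
  intro data_list a_string _ _
  show get_index2 data_list a_string = get_index2_alt data_list a_string
  simp only [get_index2, get_index2_alt]
  rw [pvA_sum, pvB_sum]
  simp
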